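-- pv_equiv track=rewrite | github.com/NamNaam/python-for-coding-test | 16.py | not_find_data
-- ===== SOURCE A (Python) =====
-- def not_find_data(data, target, start, end):
-- 	sum = 0
-- 	if start < end:
-- 		return start
-- 	mid = (start + end) // 2
-- 	for i in data:
-- 		if i > mid:
-- 			sum += i - mid
-- 	if sum < target :
-- 		return not_find_data(data, target, mid - 1, end)
-- 	elif sum > target :
-- 		return not_find_data(data, target, start, mid + 1)
-- 	else : # sum == target
-- 		return mid
-- ===== SOURCE B (Python) =====
-- # Same search over mid as A, but the per-step excess sum is computed in O(log n)
-- # from a sorted copy + prefix sums via a hand-written binary search, instead of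
-- # A's O(n) scan of the whole list at every level.
--
-- def _count_le(s, x):
--     # number of elements of the ascending-sorted list s that are <= x
--     lo, hi = 0, len(s)
--     while lo < hi:
--         m = (lo + hi) // 2
--         if s[m] <= x:
--             lo = m + 1
--         else:
--             hi = m
--     return lo
--
-- def not_find_data(data, target, start, end):
--     if start < end:
--         return start  # the search interval is already empty; skip preprocessing
--     s = sorted(data)
--     n = len(s)
--     pref = [0]
--     t = 0
--     for v in s:
--         t += v
--         pref.append(t)
--     total = t
--     hi, lo = start, end
--     while not (hi < lo):
--         mid = (hi + lo) // 2
--         k = _count_le(s, mid)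
--         excess = (total - pref[k]) - mid * (n - k)
--         if excess < target:
--             hi = mid - 1
--         elif excess > target:
--             lo = mid + 1
--         else:
--             return mid
--     return hi
-- ===== Notes on version B (the rewrite author's own statement) =====
-- stated objective: faster
-- what changed: B sorts the data once and builds prefix sums, then answers each search level's excess-sum query with a binary search in O(log n) and runs the threshold search as an iterative loop, instead of A's recursive search that rescans the whole list at every level.
import Mathlib
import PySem

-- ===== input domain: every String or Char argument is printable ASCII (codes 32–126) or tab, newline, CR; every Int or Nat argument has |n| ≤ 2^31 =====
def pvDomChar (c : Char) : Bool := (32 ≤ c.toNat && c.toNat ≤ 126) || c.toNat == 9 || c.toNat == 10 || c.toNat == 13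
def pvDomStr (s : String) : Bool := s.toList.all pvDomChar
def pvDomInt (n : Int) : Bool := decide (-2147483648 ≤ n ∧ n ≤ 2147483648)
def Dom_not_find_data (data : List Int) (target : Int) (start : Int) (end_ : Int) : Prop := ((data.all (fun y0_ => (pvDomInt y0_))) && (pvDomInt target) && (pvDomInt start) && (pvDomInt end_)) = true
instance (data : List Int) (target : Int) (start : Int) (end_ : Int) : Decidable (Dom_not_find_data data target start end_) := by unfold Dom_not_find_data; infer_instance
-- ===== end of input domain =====

-- B replaces A's O(n) rescans of `data` at every search level by one sort plus
-- prefix sums, answering each level's excess-sum query with a binary search.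

-- ===== PORT A =====
-- literal transliteration of A's recursion; `fuel = (start - end_ + 1).toNat`
-- only makes the recursion structural: it runs out exactly when start < end_,
-- where A returns `start` anyway (each step shrinks start - end_ by ≥ 1).
def notFindGo (data : List Int) (target : Int) : Nat → Int → Int → Int
  | 0, start, _ => start
  | fuel + 1, start, end_ =>
    if start < end_ then start
    else
      let mid := PySem.Int.floordiv (start + end_) 2
      let sum := data.foldl (fun s i => if i > mid then s + (i - mid) else s) 0
      if sum < target then notFindGo data target fuel (mid - 1) end_
      else if sum > target then notFindGo data target fuel start (mid + 1)
      else mid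

def not_find_data (data : List Int) (target : Int) (start : Int) (end_ : Int) : Int :=
  notFindGo data target (start - end_ + 1).toNat start end_

-- ===== PORT B =====
-- the `while lo < hi` loop of Source B's _count_le; fuel = (hi - lo).toNat at the
-- call (the loop halves hi - lo each pass, and exits returning lo when it is 0);
-- s[m] is always in range on the reachable calls, so the `none` arm (Python's
-- IndexError site) is unreachable
def pvCountLeGo (s : List Int) (x : Int) : Nat → Int → Int → Int
  | 0, lo, _ => lo
  | fuel + 1, lo, hi =>
    if lo < hi then
      let m := PySem.Int.floordiv (lo + hi) 2
      match PySem.List.pyGet? s m with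
      | some y => if y ≤ x then pvCountLeGo s x fuel (m + 1) hi else pvCountLeGo s x fuel lo m
      | none => lo
    else lo

def pvCountLe (s : List Int) (x : Int) : Int :=
  pvCountLeGo s x s.length 0 (s.length : Int)

-- the `while not (hi < lo)` search loop of Source B (s, n, total, pref are fixed);
-- fuel = (hi - lo + 1).toNat at the call: it runs out exactly when hi < lo,
-- where the loop exits returning hi anyway
def pvLoopB (s : List Int) (n total : Int) (pref : List Int) (target : Int) :
    Nat → Int → Int → Int
  | 0, hi, _ => hi
  | fuel + 1, hi, lo =>
    if hi < lo then hi
    else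
      let mid := PySem.Int.floordiv (hi + lo) 2
      let k := pvCountLe s mid
      -- pref[k] is always in range (0 ≤ k ≤ n); Python never raises here
      let excess := (total - (PySem.List.pyGet? pref k).getD 0) - mid * (n - k)
      if excess < target then pvLoopB s n total pref target fuel (mid - 1) lo
      else if excess > target then pvLoopB s n total pref target fuel hi (mid + 1)
      else mid

def not_find_data_alt (data : List Int) (target : Int) (start : Int) (end_ : Int) : Int :=
  if start < end_ then start  -- empty search interval: answer before preprocessing
  else
  let s := PySem.List.sorted data (fun x => x) false
  let n : Int := (s.length : Int)
  let pt := s.foldl (fun (st : Int × List Int) v => (st.1 + v, st.2 ++ [st.1 + v])) (0, [0])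
  pvLoopB s n pt.1 pt.2 target (start - end_ + 1).toNat start end_

-- ===== PRECONDITION & SPEC =====
def Spec_not_find_data (data : List Int) (target : Int) (start : Int) (end_ : Int) (out : Int) : Prop := out = not_find_data_alt data target start end_
instance (data : List Int) (target : Int) (start : Int) (end_ : Int) (out : Int) : Decidable (Spec_not_find_data data target start end_ out) := by unfold Spec_not_find_data; infer_instance

-- ===== CLAIM (what is proved, stated in full; the proofs are below) =====
def Claim_equal_not_find_data : Prop := ∀ (data : List Int) (target : Int) (start : Int) (end_ : Int), Dom_not_find_data data target start end_ → Spec_not_find_data data target start end_ (not_find_data data target start end_)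

-- ===== LEMMAS AND PROOFS =====

-- the prefix-sums loop of Source B produces (sum, List.scanl (+) 0 s)
theorem pvPref_eq (s : List Int) : ∀ (t : Int) (acc : List Int),
    s.foldl (fun (st : Int × List Int) v => (st.1 + v, st.2 ++ [st.1 + v])) (t, acc ++ [t])
      = (t + s.sum, acc ++ List.scanl (· + ·) t s) := by
  induction s with
  | nil => intro t acc; simp
  | cons v s ih =>
    intro t acc
    simp only [List.foldl_cons, List.scanl_cons]
    have := ih (t + v) (acc ++ [t])
    simp only [List.append_assoc, List.singleton_append] at this ⊢
    rw [this, Prod.mk.injEq]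
    exact ⟨by simp [List.sum_cons]; ring, rfl⟩

theorem scanl_getElem? (s : List Int) : ∀ (t : Int) (k : Nat), k ≤ s.length →
    (List.scanl (· + ·) t s)[k]? = some (t + (s.take k).sum) := by
  induction s with
  | nil =>
    intro t k hk
    simp only [List.length_nil, Nat.le_zero] at hk
    subst hk
    simp
  | cons v s ih =>
    intro t k hk
    cases k with
    | zero => simp
    | succ k =>
      simp only [List.scanl_cons, List.getElem?_cons_succ, List.take_succ_cons, List.sum_cons]
      rw [ih (t + v) k (by simpa using hk)]
      congr 1
      ring

theorem map_sub_sum (c : Int) (l : List Int) :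
    (l.map (fun i => i - c)).sum = l.sum - c * l.length := by
  induction l with
  | nil => simp
  | cons v l ih => simp [ih]; ring

-- monotonicity of a sorted list at two indices
theorem sorted_getElem_mono (s : List Int) (hs : s.Pairwise (· ≤ ·)) (i j : Nat)
    (hj : j < s.length) (hij : i ≤ j) : s[i]'(by omega) ≤ s[j] := by
  rcases Nat.lt_or_eq_of_le hij with h | h
  · exact List.pairwise_iff_getElem.1 hs i j (by omega) hj h
  · subst h; exact le_rfl

-- invariant proof of Source B's hand-written binary search
theorem pvCountLeGo_inv (s : List Int) (x : Int) (hs : s.Pairwise (· ≤ ·)) :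
    ∀ (fuel : Nat) (lo hi : Int), 0 ≤ lo → lo ≤ hi → hi ≤ (s.length : Int) →
    (hi - lo).toNat ≤ fuel →
    (∀ (j : Nat) (h : j < s.length), (j : Int) < lo → s[j] ≤ x) →
    (∀ (j : Nat) (h : j < s.length), hi ≤ (j : Int) → x < s[j]) →
    0 ≤ pvCountLeGo s x fuel lo hi ∧ pvCountLeGo s x fuel lo hi ≤ (s.length : Int) ∧
    (∀ (j : Nat) (h : j < s.length), (j : Int) < pvCountLeGo s x fuel lo hi → s[j] ≤ x) ∧
    (∀ (j : Nat) (h : j < s.length), pvCountLeGo s x fuel lo hi ≤ (j : Int) → x < s[j]) := by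
  intro fuel
  induction fuel with
  | zero =>
    intro lo hi h0 hlh hhn hfuel hbelow habove
    have heq : lo = hi := by omega
    subst heq
    simp only [pvCountLeGo]
    exact ⟨h0, by omega, hbelow, fun j hj hjm => habove j hj (by omega)⟩
  | succ fuel ih =>
    intro lo hi h0 hlh hhn hfuel hbelow habove
    rw [pvCountLeGo]
    by_cases hlt : lo < hi
    · rw [if_pos hlt]
      have hm : lo ≤ PySem.Int.floordiv (lo + hi) 2 ∧ PySem.Int.floordiv (lo + hi) 2 ≤ hi :=
        PySem.Int.floordiv_two_mid_bounds (le_of_lt hlt)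
      have hmlt : PySem.Int.floordiv (lo + hi) 2 < hi :=
        (PySem.Int.floordiv_lt_iff_lt_mul (by omega)).2 (by omega)
      set m := PySem.Int.floordiv (lo + hi) 2 with hmdef
      have hmn : m.toNat < s.length := by omega
      have hc : ((m.toNat : Nat) : Int) = m := Int.toNat_of_nonneg (by omega)
      cases hy : PySem.List.pyGet? s m with
      | none =>
        exfalso
        rw [← hc, PySem.List.pyGet?_natCast] at hy
        simp [List.getElem?_eq_getElem hmn] at hy
      | some y =>
        have hyg : s[m.toNat] = y := by
          rw [← hc, PySem.List.pyGet?_natCast] at hy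
          exact (List.getElem?_eq_some_iff.1 hy).2
        simp only [hy]
        by_cases hyx : y ≤ x
        · simp only [if_pos hyx]
          refine ih (m + 1) hi (by omega) (by omega) hhn (by omega) ?_ habove
          intro j hj hjm
          have hjle : j ≤ m.toNat := by omega
          calc s[j] ≤ s[m.toNat] := sorted_getElem_mono s hs j m.toNat hmn hjle
            _ ≤ x := by rw [hyg]; omega
        · simp only [if_neg hyx]
          refine ih lo m h0 (by omega) (by omega) (by omega) hbelow ?_
          intro j hj hjm
          have : s[m.toNat] ≤ s[j] := sorted_getElem_mono s hs m.toNat j hj (by omega)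
          rw [hyg] at this
          omega
    · rw [if_neg hlt]
      exact ⟨h0, by omega, hbelow, fun j hj hjm => habove j hj (by omega)⟩

-- the top-level binary search counts the elements ≤ x of the sorted list:
-- take k are all ≤ x and drop k are all > x
theorem pvCountLe_spec (s : List Int) (x : Int) (hs : s.Pairwise (· ≤ ·)) :
    0 ≤ pvCountLe s x ∧ pvCountLe s x ≤ (s.length : Int) ∧
    (∀ (j : Nat) (h : j < s.length), (j : Int) < pvCountLe s x → s[j] ≤ x) ∧
    (∀ (j : Nat) (h : j < s.length), pvCountLe s x ≤ (j : Int) → x < s[j]) := by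
  refine pvCountLeGo_inv s x hs s.length 0 (s.length : Int) le_rfl (by positivity) le_rfl
    (by omega) ?_ ?_
  · intro j h hj; omega
  · intro j h hj; omega

-- A's per-level loop sum equals B's prefix-sum formula
theorem excess_eq (data : List Int) (mid : Int) :
    data.foldl (fun s i => if i > mid then s + (i - mid) else s) 0 =
      ((PySem.List.sorted data (fun x => x) false).sum -
        (PySem.List.pyGet? (List.scanl (· + ·) 0 (PySem.List.sorted data (fun x => x) false))
          (pvCountLe (PySem.List.sorted data (fun x => x) false) mid)).getD 0) -
      mid * (((PySem.List.sorted data (fun x => x) false).length : Int) -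
        pvCountLe (PySem.List.sorted data (fun x => x) false) mid) := by
  set s := PySem.List.sorted data (fun x => x) false with hsdef
  have hs : s.Pairwise (· ≤ ·) := PySem.List.sorted_pairwise data (fun x => x)
  have hperm : s.Perm data := PySem.List.sorted_perm data (fun x => x) false
  obtain ⟨hk0, hkn, hble, hagt⟩ := pvCountLe_spec s mid hs
  set k := pvCountLe s mid with hkdef
  set K := k.toNat with hKdef
  have hKk : (K : Int) = k := Int.toNat_of_nonneg hk0
  have hKn : K ≤ s.length := by omega
  -- A's loop is the sum of (i - mid) over the elements > mid
  rw [PySem.List.foldl_ite_eq_foldl_filter (p := fun i => mid < i)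
        (f := fun acc i => acc + (i - mid)),
      PySem.List.foldl_add]
  have hfil : (data.filter (fun i => decide (mid < i))).Perm
      (s.filter (fun i => decide (mid < i))) :=
    (hperm.filter (fun i => decide (mid < i))).symm
  rw [(hfil.map (fun i => i - mid)).sum_eq]
  -- on the sorted list the elements > mid are exactly the suffix from K
  have hdrop : s.filter (fun i => decide (mid < i)) = s.drop K := by
    conv_lhs => rw [← List.take_append_drop K s]
    rw [List.filter_append]
    have h1 : (s.take K).filter (fun i => decide (mid < i)) = [] := by
      rw [List.filter_eq_nil_iff]
      intro a ha
      obtain ⟨j, hj, hja⟩ := List.mem_take_iff_getElem.1 ha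
      have : s[j]'(by omega) ≤ mid := hble j (by omega) (by omega)
      simp only [← hja, decide_eq_true_eq]
      omega
    have h2 : (s.drop K).filter (fun i => decide (mid < i)) = s.drop K := by
      rw [List.filter_eq_self]
      intro a ha
      obtain ⟨j, hj, hja⟩ := List.mem_iff_getElem.1 ha
      have hjs : K + j < s.length := by
        have := hj; rw [List.length_drop] at this; omega
      have : mid < s[K + j] := hagt (K + j) hjs (by omega)
      rw [List.getElem_drop] at hja
      simp only [← hja, decide_eq_true_eq]
      omega
    rw [h1, h2, List.nil_append]
  rw [hdrop, map_sub_sum]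
  -- pref[k] is the sum of the K smallest elements
  have hpref : (PySem.List.pyGet? (List.scanl (· + ·) 0 s) k).getD 0 = (s.take K).sum := by
    rw [← hKk, PySem.List.pyGet?_natCast, scanl_getElem? s 0 K hKn]
    simp
  rw [hpref]
  have hlen : ((s.drop K).length : Int) = (s.length : Int) - k := by
    rw [List.length_drop]; omega
  have hsum : (s.drop K).sum = s.sum - (s.take K).sum := by
    have := List.sum_take_add_sum_drop s K; omega
  rw [hlen, hsum]
  ring

-- with enough fuel A's recursion and B's loop walk the same midpoints and,
-- by excess_eq, test the same sums, so they return the same threshold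
theorem loopB_eq_aux (data : List Int) (target : Int) :
    ∀ (fuel : Nat) (start end_ : Int), (start - end_ + 1).toNat ≤ fuel →
    notFindGo data target fuel start end_ =
      pvLoopB (PySem.List.sorted data (fun x => x) false)
        ((PySem.List.sorted data (fun x => x) false).length : Int)
        (PySem.List.sorted data (fun x => x) false).sum
        (List.scanl (· + ·) 0 (PySem.List.sorted data (fun x => x) false))
        target fuel start end_ := by
  intro fuel
  induction fuel with
  | zero => intro start end_ h; rfl
  | succ fuel ih =>
    intro start end_ h
    rw [notFindGo, pvLoopB]
    by_cases hlt : start < end_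
    · rw [if_pos hlt, if_pos hlt]
    · have hm : end_ ≤ PySem.Int.floordiv (start + end_) 2 ∧
          PySem.Int.floordiv (start + end_) 2 ≤ start := by
        rw [Int.add_comm]
        exact PySem.Int.floordiv_two_mid_bounds (by omega)
      rw [if_neg hlt, if_neg hlt]
      simp only []
      rw [excess_eq data (PySem.Int.floordiv (start + end_) 2)]
      split_ifs
      · exact ih (PySem.Int.floordiv (start + end_) 2 - 1) end_ (by omega)
      · exact ih start (PySem.Int.floordiv (start + end_) 2 + 1) (by omega)
      · rfl

-- ===== VERDICT (by name: the statement is the Claim_ definition above) =====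
theorem not_find_data_spec : Claim_equal_not_find_data := by
  intro data target start end_ _
  have hp := pvPref_eq (PySem.List.sorted data (fun x => x) false) 0 []
  simp only [List.nil_append] at hp
  unfold Spec_not_find_data not_find_data_alt not_find_data
  by_cases hlt : start < end_
  · rw [if_pos hlt]
    have h0 : (start - end_ + 1).toNat = 0 ∨ (start - end_ + 1).toNat = 1 ∨ ¬ start < end_ := by omega
    rcases h0 with h | h | h
    · rw [h]; rfl
    · rw [h, notFindGo, if_pos hlt]
    · exact absurd hlt h
  · rw [if_neg hlt]
    simp only [hp]
    simpa using loopB_eq_aux data target (start - end_ + 1).toNat start end_ le_rfl
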